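-- pv_equiv track=rewrite | github.com/alexwday/factset | calendar_refresh/visualization/generate_calendar.py | get_grouped_event_types
-- ===== SOURCE A (Python) =====
-- def get_grouped_event_types(events):
--     """
--     Get unique event types, grouping earnings-related types into one.
--     Returns list of display names for the filter dropdown.
--     """
--     # Earnings types that should be grouped together
--     earnings_types = {'Earnings', 'ConfirmedEarningsRelease', 'ProjectedEarningsRelease'}
--
--     # Collect all unique event types from the data
--     all_types = set()
--     has_earnings = False
--
--     for event in events:
--         event_type = event.get('event_type', '')
--         if event_type in earnings_types:
--             has_earnings = True
--         elif event_type: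
--             all_types.add(event_type)
--
--     # Build the final list for display
--     result = []
--     if has_earnings:
--         result.append('Earnings')  # Single option for all earnings types
--
--     result.extend(sorted(all_types))
--     return result
-- ===== SOURCE B (Python) =====
-- def get_grouped_event_types(events):
--     """
--     Get unique event types, grouping earnings-related types into one.
--     Returns list of display names for the filter dropdown.
--     """
--     earnings_types = ('Earnings', 'ConfirmedEarningsRelease', 'ProjectedEarningsRelease')
--     # Sort all types (with duplicates), then deduplicate by skipping adjacent repeats:
--     # no hash set is ever built.
--     types = sorted(e.get('event_type', '') for e in events)
--     result = ['Earnings'] if any(t in earnings_types for t in types) else []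
--     prev = None
--     for t in types:
--         if t != prev and t and t not in earnings_types:
--             result.append(t)
--         prev = t
--     return result
-- ===== Notes on version B (the rewrite author's own statement) =====
-- stated objective: alternative
-- what changed: Replaces A's hash-set accumulation (incremental set + flag during one pass) by sort-then-scan: sort all event types with duplicates first, compute the earnings flag with any(), then deduplicate by skipping adjacent repeats while filtering - no set is ever built.
import Mathlib
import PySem

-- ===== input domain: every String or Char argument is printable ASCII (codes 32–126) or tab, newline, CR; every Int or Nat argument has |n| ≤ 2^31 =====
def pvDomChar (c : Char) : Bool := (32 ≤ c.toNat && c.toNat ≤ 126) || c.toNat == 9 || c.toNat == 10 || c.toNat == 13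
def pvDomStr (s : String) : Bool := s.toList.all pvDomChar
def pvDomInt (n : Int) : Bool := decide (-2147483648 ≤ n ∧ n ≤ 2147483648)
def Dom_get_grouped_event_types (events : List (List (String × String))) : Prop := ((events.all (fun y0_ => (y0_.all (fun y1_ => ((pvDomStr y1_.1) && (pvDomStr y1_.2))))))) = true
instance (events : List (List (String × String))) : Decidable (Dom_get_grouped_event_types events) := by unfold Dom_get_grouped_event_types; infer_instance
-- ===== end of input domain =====

-- B replaces A's hash-set accumulation (incremental set + flag in one pass) by
-- sort-then-scan: sort all event types with duplicates, take the flag by any(),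
-- deduplicate by skipping adjacent repeats (objective: alternative; same cost).

-- .get('event_type','') on an event dict (assoc list under the type convention)
def pvGetET (event : List (String × String)) : String :=
  PySem.Dict.getD (PySem.Dict.mk event) "event_type" ""

-- A's earnings_types set literal
def pvEarnings : PySem.Set String :=
  PySem.Set.ofList ["Earnings", "ConfirmedEarningsRelease", "ProjectedEarningsRelease"]

-- ===== PORT A =====
-- loop body of A's `for event in events`
def pvStepA (st : PySem.Set String × Bool) (event : List (String × String)) :
    PySem.Set String × Bool :=
  let event_type := pvGetET event
  if PySem.Set.contains pvEarnings event_type then (st.1, true)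
  else if event_type ≠ "" then (PySem.Set.add st.1 event_type, st.2)
  else st

def get_grouped_event_types (events : List (List (String × String))) : List String :=
  let st := events.foldl pvStepA (PySem.Set.empty, false)
  (if st.2 then ["Earnings"] else []) ++ PySem.List.sorted st.1 (fun x => x) false

-- ===== PORT B =====
-- B's earnings_types tuple literal (membership list, as in Source B's tuple)
def pvEarnTuple : List String :=
  ["Earnings", "ConfirmedEarningsRelease", "ProjectedEarningsRelease"]

-- body of B's `for t in types` scan (state: result so far, prev)
def pvStepB (st : List String × Option String) (t : String) :
    List String × Option String :=
  if (st.2 != some t) && (t != "") && !(pvEarnTuple.contains t) then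
    (st.1 ++ [t], some t)
  else (st.1, some t)

def get_grouped_event_types_alt (events : List (List (String × String))) : List String :=
  let types := PySem.List.sorted (events.map (fun e => pvGetET e)) (fun x => x) false
  let result := if types.any (fun t => pvEarnTuple.contains t) then ["Earnings"] else []
  (types.foldl pvStepB (result, none)).1

-- ===== PRECONDITION & SPEC =====
def Spec_get_grouped_event_types (events : List (List (String × String))) (out : List String) : Prop := out = get_grouped_event_types_alt events
instance (events : List (List (String × String))) (out : List String) : Decidable (Spec_get_grouped_event_types events out) := by unfold Spec_get_grouped_event_types; infer_instance

-- ===== CLAIM (what is proved, stated in full; the proofs are below) =====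
def Claim_equal_get_grouped_event_types : Prop := ∀ (events : List (List (String × String))), Dom_get_grouped_event_types events → Spec_get_grouped_event_types events (get_grouped_event_types events)

-- ===== LEMMAS AND PROOFS =====

-- display-filter predicate: nonempty and not an earnings type
def pvP (t : String) : Bool := (t != "") && !(pvEarnTuple.contains t)

theorem pv_filter_add (L : List String) (t : String) :
    (PySem.Set.add L t).filter pvP = if pvP t then PySem.Set.add (L.filter pvP) t else L.filter pvP := by
  by_cases hp : pvP t = true
  · simp only [hp, PySem.Set.add, PySem.Set.contains]
    by_cases hm : t ∈ L
    · have hm' : t ∈ L.filter pvP := List.mem_filter.mpr ⟨hm, hp⟩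
      simp [hm, hm']
    · have hm' : t ∉ L.filter pvP := fun h => hm (List.mem_filter.mp h).1
      simp [hm, hm', List.filter_append, hp]
  · have hp' : pvP t = false := by simpa using hp
    simp only [hp', PySem.Set.add, PySem.Set.contains, Bool.false_eq_true, if_false]
    by_cases hm : t ∈ L
    · rw [if_pos (by simpa using hm)]
    · rw [if_neg (by simpa using hm), List.filter_append]
      simp [hp']

-- A's loop characterised: filtered set of collected types, and the earnings flag
theorem pv_main (evts : List (List (String × String))) (L : List String) (b : Bool) :
    evts.foldl pvStepA (L.filter pvP, b) =
      (((evts.map (fun event => pvGetET event)).foldl PySem.Set.add L).filter pvP,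
       b || (evts.map (fun event => pvGetET event)).any
              (fun t => PySem.Set.contains pvEarnings t)) := by
  induction evts generalizing L b with
  | nil => simp
  | cons e rest ih =>
    simp only [List.foldl_cons, List.map_cons, List.any_cons]
    set t := pvGetET e with ht
    by_cases hc : t ∈ pvEarnings
    · have hstep : pvStepA (L.filter pvP, b) e = (L.filter pvP, true) := by
        simp [pvStepA, PySem.Set.contains, ← ht, hc]
      have hfa : (PySem.Set.add L t).filter pvP = L.filter pvP := by
        rw [pv_filter_add]; simp [pvP, show t ∈ pvEarnTuple from hc]
      rw [hstep, ← hfa, ih (PySem.Set.add L t) true]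
      simp [PySem.Set.contains, hc]
    · by_cases he : t = ""
      · have hc2 : ¬(("" : String) ∈ pvEarnings) := he ▸ hc
        have hstep : pvStepA (L.filter pvP, b) e = (L.filter pvP, b) := by
          simp [pvStepA, PySem.Set.contains, ← ht, hc2, he]
        have hfa : (PySem.Set.add L t).filter pvP = L.filter pvP := by
          rw [pv_filter_add]; simp [pvP, he]
        rw [hstep, ← hfa, ih (PySem.Set.add L t) b]
        simp [PySem.Set.contains, hc]
      · have hp : pvP t = true := by
          simp [pvP, he, show t ∉ pvEarnTuple from hc]
        have hstep : pvStepA (L.filter pvP, b) e =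
            (PySem.Set.add (L.filter pvP) t, b) := by
          simp [pvStepA, PySem.Set.contains, ← ht, hc, he]
        have hfa : (PySem.Set.add L t).filter pvP = PySem.Set.add (L.filter pvP) t := by
          rw [pv_filter_add]; simp [hp]
        rw [hstep, ← hfa, ih (PySem.Set.add L t) b]
        simp [PySem.Set.contains, hc]

-- "prev is below every remaining element" (None is below everything)
def pvBelow (p : Option String) (t : String) : Prop :=
  match p with
  | none => True
  | some x => x ≤ t

-- B's scan characterised: it appends a strictly increasing list holding exactly the
-- kept (filtered, ≠ prev) values of the sorted remainder
theorem pv_scan (ts : List String) (acc : List String) (p : Option String)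
    (hs : ts.Pairwise (· ≤ ·)) (hp : ∀ t ∈ ts, pvBelow p t) :
    ∃ out, (ts.foldl pvStepB (acc, p)).1 = acc ++ out ∧
      (∀ t', t' ∈ out ↔ t' ∈ ts ∧ pvP t' = true ∧ p ≠ some t') ∧
      out.Pairwise (· < ·) := by
  induction ts generalizing acc p with
  | nil => exact ⟨[], by simp, by simp, List.Pairwise.nil⟩
  | cons t rest ih =>
    have hall : ∀ r ∈ rest, t ≤ r := fun r hr => (List.pairwise_cons.mp hs).1 r hr
    have hrest : rest.Pairwise (· ≤ ·) := (List.pairwise_cons.mp hs).2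
    have hp' : ∀ r ∈ rest, pvBelow (some t) r := fun r hr => hall r hr
    -- key fact: prev p cannot name any element of rest other than t itself
    have hpr : ∀ t', t' ∈ rest → t' ≠ t → p ≠ some t' := by
      intro t' ht' hne hpe
      have hxt : pvBelow p t := hp t (by simp)
      rw [hpe] at hxt
      have h1 : t' ≤ t := hxt
      have h2 : t ≤ t' := hall t' ht'
      exact hne (le_antisymm h1 h2)
    by_cases hc : ((p != some t) && (t != "") && !(pvEarnTuple.contains t)) = true
    · have hpv : pvP t = true := by
        simp only [pvP]; simp only [Bool.and_assoc, Bool.and_eq_true] at hc ⊢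
        exact ⟨hc.2.1, hc.2.2⟩
      have hpt : p ≠ some t := by
        intro h; simp [h] at hc
      have hstep : pvStepB (acc, p) t = (acc ++ [t], some t) := by
        simp only [pvStepB]; rw [if_pos]; exact hc
      obtain ⟨out', h1, h2, h3⟩ := ih (acc ++ [t]) (some t) hrest hp'
      refine ⟨t :: out', by simpa [hstep, List.append_assoc] using h1, ?_, ?_⟩
      · intro t'
        constructor
        · intro hmem
          rcases List.mem_cons.mp hmem with rfl | ht'
          · exact ⟨by simp, hpv, hpt⟩
          · obtain ⟨hm, hpv', hne⟩ := (h2 t').mp ht'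
            have hne' : t' ≠ t := fun h => hne (by rw [h])
            exact ⟨by simp [hm], hpv', hpr t' hm hne'⟩
        · rintro ⟨hm, hpv', hne⟩
          by_cases heq : t' = t
          · simp [heq]
          · have hm' : t' ∈ rest := by
              rcases List.mem_cons.mp hm with h | h
              · exact absurd h heq
              · exact h
            have : t' ∈ out' := (h2 t').mpr
              ⟨hm', hpv', fun h => heq (Option.some_inj.mp h).symm⟩
            simp [this]
      · refine List.pairwise_cons.mpr ⟨?_, h3⟩
        intro t' ht'
        obtain ⟨hm, _, hne⟩ := (h2 t').mp ht'
        have : t ≤ t' := hall t' hm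
        exact lt_of_le_of_ne this (fun h => hne (by rw [h]))
    · have hstep : pvStepB (acc, p) t = (acc, some t) := by
        simp only [pvStepB]; rw [if_neg]; exact hc
      obtain ⟨out', h1, h2, h3⟩ := ih acc (some t) hrest hp'
      refine ⟨out', by simpa [hstep] using h1, ?_, h3⟩
      intro t'
      rw [h2 t']
      -- why the branch did not fire: p = some t, or pvP t = false
      by_cases hPt : pvP t = true
      · have hpe : p = some t := by
          by_contra hne
          apply hc
          simp only [pvP, Bool.and_eq_true] at hPt
          simp [bne, hne]
          exact ⟨by simpa using hPt.1, by simpa using hPt.2⟩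
        constructor
        · rintro ⟨hm, hpv', hne⟩
          have hne' : t' ≠ t := fun h => hne (by rw [h])
          exact ⟨by simp [hm], hpv', by rw [hpe]; simpa [eq_comm] using hne'⟩
        · rintro ⟨hm, hpv', hne⟩
          have hne' : t' ≠ t := by
            intro h; exact hne (by rw [h, hpe])
          have hm' : t' ∈ rest := by
            rcases List.mem_cons.mp hm with h | h
            · exact absurd h hne'
            · exact h
          exact ⟨hm', hpv', by simpa [eq_comm] using hne'⟩
      · have hPt' : pvP t = false := by simpa using hPt
        constructor
        · rintro ⟨hm, hpv', hne⟩
          have hne' : t' ≠ t := fun h => hne (by rw [h])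
          exact ⟨by simp [hm], hpv', hpr t' hm hne'⟩
        · rintro ⟨hm, hpv', hne⟩
          have hne' : t' ≠ t := by
            intro h; rw [h] at hpv'; rw [hpv'] at hPt'; exact Bool.true_eq_false.mp hPt'
          have hm' : t' ∈ rest := by
            rcases List.mem_cons.mp hm with h | h
            · exact absurd h hne'
            · exact h
          exact ⟨hm', hpv', by simpa [eq_comm] using hne'⟩

-- A's flag over the raw types equals B's any() over the sorted types
theorem pv_flag (ts : List String) :
    (PySem.List.sorted ts (fun x => x) false).any (fun t => pvEarnTuple.contains t)
      = ts.any (fun t => PySem.Set.contains pvEarnings t) := by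
  have hmem : ∀ t, t ∈ PySem.List.sorted ts (fun x => x) false ↔ t ∈ ts :=
    fun t => PySem.List.mem_sorted ts (fun x => x) false t
  by_cases h : ts.any (fun t => PySem.Set.contains pvEarnings t) = true
  · rw [h]
    obtain ⟨x, hx, hpx⟩ := List.any_eq_true.mp h
    exact List.any_eq_true.mpr ⟨x, (hmem x).mpr hx, by simpa [PySem.Set.contains] using hpx⟩
  · have h' := (Bool.not_eq_true _).mp h
    rw [h']
    simp only [List.any_eq_false] at h' ⊢
    intro x hx
    have := h' x ((hmem x).mp hx)
    simpa [PySem.Set.contains] using this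

-- ===== VERDICT (by name: the statement is the Claim_ definition above) =====
theorem get_grouped_event_types_spec : Claim_equal_get_grouped_event_types := by
  intro events _
  unfold Spec_get_grouped_event_types get_grouped_event_types get_grouped_event_types_alt
  have hA : events.foldl pvStepA (PySem.Set.empty, false)
      = (((events.map (fun event => pvGetET event)).foldl PySem.Set.add []).filter pvP,
         false || (events.map (fun event => pvGetET event)).any
              (fun t => PySem.Set.contains pvEarnings t)) := pv_main events [] false
  obtain ⟨out, hout, hmemo, hlt⟩ := pv_scan
      (PySem.List.sorted (events.map (fun e => pvGetET e)) (fun x => x) false)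
      (if (PySem.List.sorted (events.map (fun e => pvGetET e)) (fun x => x) false).any
            (fun t => pvEarnTuple.contains t) then ["Earnings"] else [])
      none (PySem.List.sorted_pairwise _ _) (fun t _ => trivial)
  have hXnodup : ((PySem.Set.ofList (events.map (fun e => pvGetET e))).filter pvP).Nodup :=
    (PySem.Set.nodup_ofList _).filter _
  have honodup : out.Nodup := hlt.imp (fun h => ne_of_lt h)
  have hperm : out.Perm ((PySem.Set.ofList (events.map (fun e => pvGetET e))).filter pvP) := by
    rw [List.perm_ext_iff_of_nodup honodup hXnodup]
    intro a
    rw [hmemo a, List.mem_filter, PySem.Set.mem_ofList]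
    constructor
    · rintro ⟨hm, hp, _⟩
      exact ⟨(PySem.List.mem_sorted _ _ _ _).mp hm, hp⟩
    · rintro ⟨hm, hp⟩
      exact ⟨(PySem.List.mem_sorted _ _ _ _).mpr hm, hp, by simp⟩
  have hsorted := PySem.List.sorted_eq_of_perm_of_pairwise_lt _ out (fun x => x) hperm hlt
  have hfold : ((events.map (fun e => pvGetET e)).foldl PySem.Set.add []).filter pvP
      = (PySem.Set.ofList (events.map (fun e => pvGetET e))).filter pvP := by
    rw [PySem.Set.ofList_eq_foldl]
  simp only [hA, Bool.false_or]
  rw [hout, hfold, hsorted, pv_flag]
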